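-- pv_equiv track=rewrite | github.com/likenji/pycbg | xyq/parser.py | remove_sharp_marker
-- ===== SOURCE A (Python) =====
-- def remove_sharp_marker(desc):
-- 	styleStart = "#"
-- 	length = len(desc)
-- 	i = 0
-- 	new_desc = ""
-- 	while(i < length):
-- 		if desc[i] == styleStart:
-- 			i += 1
-- 			if i == length:
-- 				break
-- 			elif desc[i] == "c":
-- 				i += 7
-- 			else:
-- 				i += 1
-- 		else:
-- 			new_desc += desc[i]
-- 			i += 1
-- 	return new_desc
-- ===== SOURCE B (Python) =====
-- def remove_sharp_marker(desc):
-- 	out = []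
-- 	skip = 0
-- 	sharp = False
-- 	for ch in desc:
-- 		if skip:
-- 			skip -= 1
-- 		elif sharp:
-- 			sharp = False
-- 			if ch == "c":
-- 				skip = 6
-- 		elif ch == "#":
-- 			sharp = True
-- 		else:
-- 			out.append(ch)
-- 	return "".join(out)
-- ===== Notes on version B (the rewrite author's own statement) =====
-- stated objective: faster
-- what changed: Replaced the index-arithmetic while-loop (i+=7/i+=2 jumps, quadratic string +=) with a single for-each state machine (pending-skip counter + after-sharp flag) appending kept chars to a list and joining once.
import Mathlib
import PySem

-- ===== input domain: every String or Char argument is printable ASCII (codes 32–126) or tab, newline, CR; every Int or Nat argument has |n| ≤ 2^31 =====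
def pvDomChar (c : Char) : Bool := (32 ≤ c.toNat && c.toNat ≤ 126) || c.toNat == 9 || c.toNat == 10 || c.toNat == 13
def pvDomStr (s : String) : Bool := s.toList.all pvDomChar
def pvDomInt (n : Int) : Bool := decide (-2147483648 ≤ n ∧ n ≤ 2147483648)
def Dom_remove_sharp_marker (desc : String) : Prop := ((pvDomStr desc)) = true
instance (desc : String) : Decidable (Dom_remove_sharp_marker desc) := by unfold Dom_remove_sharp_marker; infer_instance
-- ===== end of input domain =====

-- B replaces A's index-jumping while-loop by a one-pass state machine (skip counter + sharp flag); same return value, no side effects.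

-- ===== PORT A =====
-- literal port of A's while-loop: index i, length, string accumulator, the same conditional jumps
def pvAGo (cs : List Char) (len : Nat) (i : Nat) (acc : String) : String :=
  if _h : i < len then
    if cs.getD i ' ' = '#' then
      -- i += 1; if i == length: break
      if i + 1 = len then acc
      else if cs.getD (i+1) ' ' = 'c' then pvAGo cs len (i+1+7) acc   -- i += 7
      else pvAGo cs len (i+1+1) acc                                   -- i += 1
    else pvAGo cs len (i+1) (acc.push (cs.getD i ' '))
  else acc
termination_by len - i
decreasing_by all_goals omega

def remove_sharp_marker (desc : String) : String :=
  pvAGo desc.toList desc.toList.length 0 ""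

-- ===== PORT B =====
-- one step of B's for-loop state machine; state = (out chars reversed, pending skip, after-sharp flag)
def pvBStep (st : List Char × Nat × Bool) (ch : Char) : List Char × Nat × Bool :=
  match st with
  | (out, skip+1, sharp) => (out, skip, sharp)
  | (out, 0, true) => (out, if ch = 'c' then 6 else 0, false)
  | (out, 0, false) => if ch = '#' then (out, 0, true) else (ch :: out, 0, false)

def remove_sharp_marker_alt (desc : String) : String :=
  String.ofList (desc.toList.foldl pvBStep ([], 0, false)).1.reverse

-- ===== PRECONDITION & SPEC =====
def Spec_remove_sharp_marker (desc : String) (out : String) : Prop := out = remove_sharp_marker_alt desc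
instance (desc : String) (out : String) : Decidable (Spec_remove_sharp_marker desc out) := by unfold Spec_remove_sharp_marker; infer_instance

-- ===== CLAIM (what is proved, stated in full; the proofs are below) =====
def Claim_equal_remove_sharp_marker : Prop := ∀ (desc : String), Dom_remove_sharp_marker desc → Spec_remove_sharp_marker desc (remove_sharp_marker desc)

-- ===== LEMMAS AND PROOFS =====

-- reference recursion both ports are reduced to
def pvF : List Char → List Char
  | [] => []
  | c :: rest =>
    if c = '#' then
      match rest with
      | [] => []
      | d :: t => if d = 'c' then pvF (t.drop 6) else pvF t
    else c :: pvF rest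
termination_by l => l.length
decreasing_by all_goals simp; all_goals omega

lemma pvF_nil : pvF [] = [] := by simp [pvF]
lemma pvF_sharp_nil : pvF ['#'] = [] := by simp [pvF]
lemma pvF_sharp_c (t : List Char) : pvF ('#'::'c'::t) = pvF (t.drop 6) := by simp [pvF]
lemma pvF_sharp (d : Char) (t : List Char) (h : ¬ d = 'c') : pvF ('#'::d::t) = pvF t := by
  rw [pvF.eq_def]; simp [h]
lemma pvF_cons (c : Char) (rest : List Char) (h : ¬ c = '#') : pvF (c::rest) = c :: pvF rest := by
  rw [pvF.eq_def]; simp [h]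

lemma pvAGo_eq_aux (cs : List Char) (k : Nat) : ∀ i acc, cs.length - i ≤ k →
    pvAGo cs cs.length i acc = acc ++ String.ofList (pvF (cs.drop i)) := by
  induction k with
  | zero =>
    intro i acc hk
    rw [pvAGo]
    simp only [show ¬ i < cs.length by omega, dif_neg, not_false_iff]
    rw [List.drop_eq_nil_of_le (by omega), pvF_nil]
    simp
  | succ k ih =>
    intro i acc hk
    rw [pvAGo]
    by_cases hi : i < cs.length
    · have hdrop : cs.drop i = cs[i] :: cs.drop (i+1) := List.drop_eq_getElem_cons hi
      have hgd : cs.getD i ' ' = cs[i] := List.getD_eq_getElem cs ' ' hi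
      simp only [dif_pos hi, hgd]
      by_cases hsharp : cs[i] = '#'
      · simp only [if_pos hsharp]
        by_cases hend : i + 1 = cs.length
        · rw [if_pos hend, hdrop, hsharp]
          rw [List.drop_eq_nil_of_le (by omega), pvF_sharp_nil]
          simp
        · have hi1 : i + 1 < cs.length := by omega
          have hdrop1 : cs.drop (i+1) = cs[i+1] :: cs.drop (i+2) := List.drop_eq_getElem_cons hi1
          have hgd1 : cs.getD (i+1) ' ' = cs[i+1] := List.getD_eq_getElem cs ' ' hi1
          rw [if_neg hend, hgd1, hdrop, hdrop1, hsharp]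
          by_cases hc : cs[i+1] = 'c'
          · rw [if_pos hc, hc, ih _ acc (by omega), pvF_sharp_c]
            rw [show cs.drop (i+1+7) = (cs.drop (i+2)).drop 6 by rw [List.drop_drop]]
          · rw [if_neg hc, ih _ acc (by omega), pvF_sharp _ _ hc]
      · rw [if_neg hsharp, ih _ _ (by omega), hdrop, pvF_cons _ _ hsharp]
        apply String.ext
        simp
    · simp only [dif_neg hi]
      rw [List.drop_eq_nil_of_le (by omega), pvF_nil]
      simp

lemma pvAGo_eq (cs : List Char) : ∀ i acc, pvAGo cs cs.length i acc = acc ++ String.ofList (pvF (cs.drop i)) := by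
  intro i acc
  exact pvAGo_eq_aux cs (cs.length - i) i acc le_rfl

lemma pvB_skip (skip : Nat) : ∀ (cs out : List Char),
    (cs.foldl pvBStep (out, skip, false)).1 = ((cs.drop skip).foldl pvBStep (out, 0, false)).1 := by
  induction skip with
  | zero => intro cs out; simp
  | succ k ih =>
    intro cs out
    cases cs with
    | nil => simp
    | cons a t =>
      simp only [List.foldl_cons, List.drop_succ_cons]
      show (t.foldl pvBStep (out, k, false)).1 = _
      exact ih t out

lemma pvB_eq (n : Nat) : ∀ cs : List Char, cs.length ≤ n →
    (∀ out : List Char, (cs.foldl pvBStep (out, 0, false)).1 = (pvF cs).reverse ++ out) ∧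
    (∀ out : List Char, (cs.foldl pvBStep (out, 0, true)).1 = (pvF ('#' :: cs)).reverse ++ out) := by
  induction n with
  | zero =>
    intro cs hcs
    have : cs = [] := List.eq_nil_of_length_eq_zero (by omega)
    subst this
    constructor <;> intro out <;> simp [pvF_nil, pvF_sharp_nil]
  | succ n ih =>
    intro cs hcs
    cases cs with
    | nil => constructor <;> intro out <;> simp [pvF_nil, pvF_sharp_nil]
    | cons a t =>
      have ht : t.length ≤ n := by simpa using Nat.lt_succ_iff.mp (by simpa using hcs)
      constructor
      · intro out
        simp only [List.foldl_cons]
        by_cases ha : a = '#'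
        · show ((t.foldl pvBStep (if a = '#' then (out,0,true) else (a::out,0,false))).1) = _
          rw [if_pos ha, (ih t ht).2 out, ha]
        · show ((t.foldl pvBStep (if a = '#' then (out,0,true) else (a::out,0,false))).1) = _
          rw [if_neg ha, (ih t ht).1 (a :: out), pvF_cons _ _ ha]
          simp
      · intro out
        simp only [List.foldl_cons]
        show ((t.foldl pvBStep (out, if a = 'c' then 6 else 0, false)).1) = _
        by_cases ha : a = 'c'
        · rw [if_pos ha, pvB_skip 6 t out,
            ((ih (t.drop 6) (le_trans (by simp) ht)).1 out), ha, pvF_sharp_c]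
        · rw [if_neg ha, ((ih t ht).1 out), pvF_sharp _ _ ha]

-- ===== VERDICT (by name: the statement is the Claim_ definition above) =====
theorem remove_sharp_marker_spec : Claim_equal_remove_sharp_marker := by
  intro desc _
  unfold Spec_remove_sharp_marker remove_sharp_marker remove_sharp_marker_alt
  rw [pvAGo_eq, (pvB_eq desc.toList.length desc.toList le_rfl).1]
  simp
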